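-- pv_equiv track=rewrite | github.com/kudinov-fedor/python-core-training | old/irepela/homework_2/three_words.py | has_three_words_in_sequence_sol_1
-- ===== SOURCE A (Python) =====
-- def has_three_words_in_sequence_sol_1(text: str) -> bool:
--     """
--         Checks if text has 3 words in sequence
--
--         Args:
--             text (str): text to analyze words in sequence
--
--         Returns:
--             bool: True if the text contains 3 words in sequence
--     """
--     counter = 0
--     word_list = text.split()
--
--     for word in word_list:
--
--         if word.isnumeric():
--             counter = 0
--         else:
--             counter += 1
--
--         if counter == 3:
--             break
--
--     return counter == 3
-- ===== SOURCE B (Python) =====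
-- def has_three_words_in_sequence_sol_1(text: str) -> bool:
--     """Idiomatic re-implementation: build the non-numeric flags first, then
--     test whether any sliding window of length 3 is all non-numeric."""
--     flags = [not w.isnumeric() for w in text.split()]
--     return any(a and b and c for a, b, c in zip(flags, flags[1:], flags[2:]))
-- ===== Notes on version B (the rewrite author's own statement) =====
-- stated objective: idiomatic
-- what changed: Replaces the incremental counter-with-break loop by first mapping each word to a non-numeric flag and then testing whether any length-3 sliding window (zip of the list with its two shifts) is all non-numeric.
import Mathlib
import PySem

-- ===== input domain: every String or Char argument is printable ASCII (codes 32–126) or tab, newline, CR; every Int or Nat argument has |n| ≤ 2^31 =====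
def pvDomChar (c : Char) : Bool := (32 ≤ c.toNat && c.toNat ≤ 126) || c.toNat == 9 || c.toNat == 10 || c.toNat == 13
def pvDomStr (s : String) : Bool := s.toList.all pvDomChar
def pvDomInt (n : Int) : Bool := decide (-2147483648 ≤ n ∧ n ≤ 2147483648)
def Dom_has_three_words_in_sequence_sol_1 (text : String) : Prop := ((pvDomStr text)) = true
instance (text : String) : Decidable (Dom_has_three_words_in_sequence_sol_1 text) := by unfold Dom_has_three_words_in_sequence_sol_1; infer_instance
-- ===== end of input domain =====

-- B is an idiomatic re-implementation: map words to non-numeric flags, then test any length-3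
-- window of all-non-numeric via zips, instead of A's incremental counter with early break.
-- str.isnumeric is ported as PySem.Str.strIsdigit: exact on the ASCII domain Dom, where the two agree.

-- ===== PORT A =====
-- the for-loop with counter and break
def pvLoopA : List String → Int → Int
  | [], c => c
  | w :: ws, c =>
    let c' := if PySem.Str.strIsdigit w then 0 else c + 1
    if c' = 3 then c' else pvLoopA ws c'

def has_three_words_in_sequence_sol_1 (text : String) : Bool :=
  decide (pvLoopA (PySem.Str.split₀ text) 0 = 3)

-- ===== PORT B =====
def has_three_words_in_sequence_sol_1_alt (text : String) : Bool :=
  let flags := (PySem.Str.split₀ text).map (fun w => !(PySem.Str.strIsdigit w))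
  -- zip(flags, flags[1:], flags[2:]) as nested binary zips
  (flags.zip ((PySem.List.slice flags (some 1) none).zip (PySem.List.slice flags (some 2) none))).any
    (fun t => t.1 && t.2.1 && t.2.2)

-- ===== PRECONDITION & SPEC =====
def Spec_has_three_words_in_sequence_sol_1 (text : String) (out : Bool) : Prop := out = has_three_words_in_sequence_sol_1_alt text
instance (text : String) (out : Bool) : Decidable (Spec_has_three_words_in_sequence_sol_1 text out) := by unfold Spec_has_three_words_in_sequence_sol_1; infer_instance

-- ===== CLAIM (what is proved, stated in full; the proofs are below) =====
def Claim_equal_has_three_words_in_sequence_sol_1 : Prop := ∀ (text : String), Dom_has_three_words_in_sequence_sol_1 text → Spec_has_three_words_in_sequence_sol_1 text (has_three_words_in_sequence_sol_1 text)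

-- ===== LEMMAS AND PROOFS =====

-- "pvNeed l k": scanning flags l, we still need k consecutive `true`s (a `false` resets the need to 3)
def pvNeed : List Bool → Nat → Bool
  | _, 0 => true
  | [], _ + 1 => false
  | b :: bs, k + 1 => if b then (if k = 0 then true else pvNeed bs k) else pvNeed bs 3

-- B's window test, with the slices reduced to drops
def pvWin (l : List Bool) : Bool :=
  (l.zip ((l.drop 1).zip (l.drop 2))).any (fun t => t.1 && t.2.1 && t.2.2)

theorem pvSlice1 (l : List Bool) : PySem.List.slice l (some 1) none = l.drop 1 := by
  exact_mod_cast PySem.List.slice_from_natCast l 1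

theorem pvSlice2 (l : List Bool) : PySem.List.slice l (some 2) none = l.drop 2 := by
  exact_mod_cast PySem.List.slice_from_natCast l 2

theorem pvWin_cons (a : Bool) (t : List Bool) :
    pvWin (a :: t) = ((a && (t.drop 0).headD false && (t.drop 1).headD false) || pvWin t) := by
  match t with
  | [] => cases a <;> decide
  | [b] => cases a <;> cases b <;> decide
  | b :: c :: r => simp [pvWin, List.zip]

theorem pvLoopA_need (ws : List String) :
    ∀ k : Nat, 1 ≤ k → k ≤ 3 →
      decide (pvLoopA ws (3 - (k : Int)) = 3) = pvNeed (ws.map (fun w => !(PySem.Chars.strIsdigit w.toList))) k := by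
  induction ws with
  | nil =>
    intro k h1 h3
    have hne : ¬ ((3 : Int) - (k : Int) = 3) := by omega
    obtain ⟨k', rfl⟩ : ∃ k', k = k' + 1 := ⟨k - 1, by omega⟩
    simp [pvLoopA, pvNeed]
    omega
  | cons w ws ih =>
    intro k h1 h3
    obtain ⟨k', rfl⟩ : ∃ k', k = k' + 1 := ⟨k - 1, by omega⟩
    simp only [pvLoopA, List.map_cons, PySem.Str.strIsdigit_eq]
    by_cases hd : PySem.Chars.strIsdigit w.toList = true
    · have h03 : ¬ ((0 : Int) = 3) := by omega
      have h3' := ih 3 (by omega) (by omega)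
      have e : (3 : Int) - ((3 : Nat) : Int) = 0 := by norm_num
      rw [e] at h3'
      simpa [pvNeed, hd, h03] using h3'
    · by_cases hk : k' = 0
      · subst hk
        have e : (3 : Int) - (((0 + 1) : Nat) : Int) + 1 = 3 := by norm_num
        simp [hd, pvNeed]
      · have hne : ¬ ((3 : Int) - ((k' : Nat) : Int) = 3) := by omega
        have h' := ih k' (by omega) (by omega)
        simp only [hd, pvNeed, Bool.not_false, if_true, hk, if_false, Bool.false_eq_true] at *
        simp
        have e : (3 : Int) - ((k' : Int) + 1) + 1 = 3 - (k' : Int) := by ring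
        rw [e, if_neg hne]
        exact h'

theorem pvNeed_win : ∀ l : List Bool, pvNeed l 3 = pvWin l
  | [] => rfl
  | [a] => by cases a <;> decide
  | [a, b] => by cases a <;> cases b <;> decide
  | a :: b :: c :: t => by
    have h1 := pvNeed_win (b :: c :: t)
    have h2 := pvNeed_win (c :: t)
    have h3 := pvNeed_win t
    cases a <;> cases b <;> cases c <;>
      simp_all [pvNeed, pvWin_cons]

-- ===== VERDICT (by name: the statement is the Claim_ definition above) =====
theorem has_three_words_in_sequence_sol_1_spec : Claim_equal_has_three_words_in_sequence_sol_1 := by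
  intro text _
  unfold Spec_has_three_words_in_sequence_sol_1
  unfold has_three_words_in_sequence_sol_1 has_three_words_in_sequence_sol_1_alt
  have h := pvLoopA_need (PySem.Str.split₀ text) 3 (by omega) (by omega)
  have e : (3 : Int) - ((3 : Nat) : Int) = 0 := by norm_num
  rw [e] at h
  simp only [PySem.Str.strIsdigit_eq]
  rw [h, pvNeed_win]
  simp only [pvSlice1, pvSlice2]
  rfl
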